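-- pv_equiv track=rewrite | github.com/TheCodeTherapy/Improved-Netstat | inetstat.py | dict_values_len
-- ===== SOURCE A (Python) =====
-- def dict_values_len(dictionary, minimum_column_size=5):
--     """ Reads the given dictionary and return a new one containing each one of it's keys with it's correspondent length,
--     which represents whe length of the largest value attributed to that same key"""
--     _values_len_dict = dict()
--     for k, v in dictionary.items():
--         for _k, _v in v.items():
--             _v = str(_v)
--             if _k not in _values_len_dict or _values_len_dict[_k] < len(_v):
--                 _length = len(_v) if len(_v) >= minimum_column_size else minimum_column_size
--                 _values_len_dict.update({_k: _length})
--     return _values_len_dict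
-- ===== SOURCE B (Python) =====
-- def dict_values_len(dictionary, minimum_column_size=5):
--     """Flatten-then-group: first flatten all inner dicts into one list of
--     (key, string-length) pairs; then, for each distinct key in first-appearance
--     order (dict.fromkeys), compute its column width by a max-scan over the
--     flattened pair list, with minimum_column_size seeding the max."""
--     pairs = [(k, len(str(v))) for inner in dictionary.values() for k, v in inner.items()]
--     keys = dict.fromkeys(k for k, _ in pairs)
--     return {k: max([minimum_column_size] + [l for k2, l in pairs if k2 == k]) for k in keys}
-- ===== Notes on version B (the rewrite author's own statement) =====
-- stated objective: alternative
-- what changed: B discards A's single-pass accumulator dict entirely: it flattens all inner dicts into one (key, length) pair list, dedups the keys in first-appearance order with dict.fromkeys, and computes each key's width by a separate max-scan over the flattened list; it trades A's O(P) one-pass update for a per-key grouping scan.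
import Mathlib
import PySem

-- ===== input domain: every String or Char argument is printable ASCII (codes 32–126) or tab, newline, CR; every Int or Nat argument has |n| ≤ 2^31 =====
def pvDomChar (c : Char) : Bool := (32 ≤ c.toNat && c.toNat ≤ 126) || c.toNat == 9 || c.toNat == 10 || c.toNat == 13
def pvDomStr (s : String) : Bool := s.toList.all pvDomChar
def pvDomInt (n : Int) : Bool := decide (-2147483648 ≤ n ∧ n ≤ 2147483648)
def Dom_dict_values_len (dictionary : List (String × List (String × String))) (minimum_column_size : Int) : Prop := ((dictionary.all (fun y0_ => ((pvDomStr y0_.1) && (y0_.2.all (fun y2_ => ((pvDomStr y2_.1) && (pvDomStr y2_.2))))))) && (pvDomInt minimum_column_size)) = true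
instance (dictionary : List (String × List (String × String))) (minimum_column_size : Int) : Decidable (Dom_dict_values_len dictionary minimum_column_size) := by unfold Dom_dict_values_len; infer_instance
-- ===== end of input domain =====

-- B replaces A's single-pass accumulator dict by flatten-then-group: flatten all inner
-- dicts to (key, length) pairs, dedup the keys in first-appearance order, and compute
-- each key's width by a max-scan over the flattened pair list (alternative decomposition).

-- ===== PORT A =====
def dict_values_len (dictionary : List (String × List (String × String))) (minimum_column_size : Int) : List (String × Int) :=
  (dictionary.foldl (fun d kv =>
    kv.2.foldl (fun d p =>
      let L : Int := PySem.Str.len p.2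
      if !(d.contains p.1) || decide (d.getD p.1 0 < L) then
        d.insert p.1 (if L ≥ minimum_column_size then L else minimum_column_size)
      else d) d)
    (PySem.Dict.mk ([] : List (String × Int)))).items

-- ===== PORT B =====
-- Source B: pairs = flattened (key, len(str(v))) list; keys = dict.fromkeys (= PySem.List.dedup,
-- first occurrences in order); value = max([minimum_column_size] + lens), which is the left
-- fold of max over the lens starting from minimum_column_size (Python's max scans left to right).
def dict_values_len_alt (dictionary : List (String × List (String × String))) (minimum_column_size : Int) : List (String × Int) :=
  let pairs : List (String × Int) :=
    dictionary.flatMap (fun kv => kv.2.map (fun p => (p.1, PySem.Str.len p.2)))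
  let keys := PySem.List.dedup (pairs.map (fun q => q.1))
  keys.map (fun k =>
    (k, ((pairs.filter (fun q => q.1 == k)).map (fun q => q.2)).foldl max minimum_column_size))

-- ===== PRECONDITION & SPEC =====
def Spec_dict_values_len (dictionary : List (String × List (String × String))) (minimum_column_size : Int) (out : List (String × Int)) : Prop := out = dict_values_len_alt dictionary minimum_column_size
instance (dictionary : List (String × List (String × String))) (minimum_column_size : Int) (out : List (String × Int)) : Decidable (Spec_dict_values_len dictionary minimum_column_size out) := by unfold Spec_dict_values_len; infer_instance

-- ===== CLAIM =====
def Claim_equal_dict_values_len : Prop := ∀ (dictionary : List (String × List (String × String))) (minimum_column_size : Int), Dom_dict_values_len dictionary minimum_column_size → Spec_dict_values_len dictionary minimum_column_size (dict_values_len dictionary minimum_column_size)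

-- ===== LEMMAS AND PROOFS =====

-- A's inner-loop body, specialised to a flattened (key, length) pair.
def pvStep (m : Int) (d : PySem.Dict String Int) (q : String × Int) : PySem.Dict String Int :=
  if !(d.contains q.1) || decide (d.getD q.1 0 < q.2) then
    d.insert q.1 (if q.2 ≥ m then q.2 else m)
  else d

-- the distinct keys of the flattened pair list, in first-appearance order
def pvK (ps : List (String × Int)) : List String := PySem.List.dedup (ps.map (fun q => q.1))
-- B's per-key value
def pvV (m : Int) (ps : List (String × Int)) (x : String) : Int :=
  ((ps.filter (fun q => q.1 == x)).map (fun q => q.2)).foldl max m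
-- B's result as a function of the flattened pair list
def pvModel (m : Int) (ps : List (String × Int)) : List (String × Int) :=
  (pvK ps).map (fun x => (x, pvV m ps x))

lemma pvMem_K (ps : List (String × Int)) (x : String) :
    x ∈ pvK ps ↔ x ∈ ps.map (fun q => q.1) := PySem.List.mem_dedup _ x

lemma pvK_snoc (ps : List (String × Int)) (k : String) (L : Int) :
    pvK (ps ++ [(k, L)])
      = if k ∈ ps.map (fun q => q.1) then pvK ps else pvK ps ++ [k] := by
  unfold pvK
  rw [List.map_append]
  have h : PySem.List.dedup (ps.map (fun q => q.1) ++ [(k, L)].map (fun q => q.1))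
      = PySem.Set.add (PySem.List.dedup (ps.map (fun q => q.1))) k := by
    simp [PySem.List.dedup_eq_ofList, PySem.Set.ofList_eq_foldl, List.foldl_append]
  rw [h, PySem.Set.add]
  by_cases hm : k ∈ ps.map (fun q => q.1)
  · rw [if_pos (by simpa [PySem.Set.contains] using (PySem.List.mem_dedup _ k).mpr hm), if_pos hm]
  · rw [if_neg (by simpa [PySem.Set.contains, PySem.List.mem_dedup] using hm), if_neg hm]

lemma pvV_snoc_self (m : Int) (ps : List (String × Int)) (k : String) (L : Int) :
    pvV m (ps ++ [(k, L)]) k = max (pvV m ps k) L := by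
  unfold pvV
  simp [List.filter_append, List.foldl_append]

lemma pvV_snoc_ne (m : Int) (ps : List (String × Int)) (k x : String) (L : Int) (h : x ≠ k) :
    pvV m (ps ++ [(k, L)]) x = pvV m ps x := by
  unfold pvV
  simp [List.filter_append, Ne.symm h]

lemma pvV_not_mem (m : Int) (ps : List (String × Int)) (k : String)
    (h : k ∉ ps.map (fun q => q.1)) : pvV m ps k = m := by
  unfold pvV
  have h0 : ps.filter (fun q => q.1 == k) = [] := by
    rw [List.filter_eq_nil_iff]
    intro q hq
    simp only [beq_iff_eq]
    intro e
    exact h (List.mem_map.mpr ⟨q, hq, e⟩)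
  rw [h0]
  rfl

lemma pvM_le_V (m : Int) (ps : List (String × Int)) (x : String) : m ≤ pvV m ps x :=
  (PySem.List.le_foldl_max _ m).1

lemma pvFind_map (K : List String) (f : String → Int) (k : String) :
    (K.map (fun x => (x, f x))).find? (fun q => q.1 == k)
      = if k ∈ K then some (k, f k) else none := by
  induction K with
  | nil => rfl
  | cons x t ih =>
    simp only [List.map_cons, List.find?]
    by_cases hx : x = k
    · subst hx; simp
    · have hb : (x == k) = false := by simpa using hx
      simp [hb, ih, Ne.symm hx]

lemma pvContains_map (K : List String) (f : String → Int) (k : String) :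
    (PySem.Dict.mk (K.map (fun x => (x, f x)))).contains k = decide (k ∈ K) := by
  simp only [PySem.Dict.contains, List.any_map]
  show K.any (fun x => x == k) = decide (k ∈ K)
  induction K with
  | nil => simp
  | cons x t ih =>
    by_cases hx : x = k
    · subst hx; simp
    · simp [hx, Ne.symm hx, ih]

lemma pvGetD_map (K : List String) (f : String → Int) (k : String) :
    (PySem.Dict.mk (K.map (fun x => (x, f x)))).getD k 0 = if k ∈ K then f k else 0 := by
  simp only [PySem.Dict.getD, PySem.Dict.get?, pvFind_map K f k]
  by_cases hm : k ∈ K <;> simp [hm]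

lemma pvModel_snoc (m : Int) (ps : List (String × Int)) (k : String) (L : Int) :
    pvStep m (PySem.Dict.mk (pvModel m ps)) (k, L) = PySem.Dict.mk (pvModel m (ps ++ [(k, L)])) := by
  unfold pvStep pvModel
  rw [pvContains_map, pvGetD_map]
  by_cases hmem : k ∈ ps.map (fun q => q.1)
  · have hkK : k ∈ pvK ps := (pvMem_K ps k).mpr hmem
    rw [if_pos hkK, pvK_snoc, if_pos hmem]
    have hVm : m ≤ pvV m ps k := pvM_le_V m ps k
    by_cases hlt : pvV m ps k < L
    · rw [if_pos (by simp [hkK, hlt])]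
      apply PySem.Dict.ext
      have hc : (PySem.Dict.mk ((pvK ps).map (fun x => (x, pvV m ps x)))).contains k = true := by
        rw [pvContains_map]; simpa using hkK
      show (PySem.Dict.insert _ k (if L ≥ m then L else m)).items = _
      rw [PySem.Dict.items_insert, hc, if_pos rfl]
      show ((pvK ps).map (fun x => (x, pvV m ps x))).map (fun p => if p.1 == k then (k, if L ≥ m then L else m) else p)
          = (pvK ps).map (fun x => (x, pvV m (ps ++ [(k, L)]) x))
      rw [List.map_map]
      apply List.map_congr_left
      intro x _
      by_cases hx : x = k
      · subst hx
        have h1 : pvV m (ps ++ [(x, L)]) x = L := by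
          rw [pvV_snoc_self]; omega
        have h2 : (if L ≥ m then L else m) = L := by omega
        simp [Function.comp, h1, h2]
      · have hb : (x == k) = false := by simpa using hx
        simp [Function.comp, hb, pvV_snoc_ne m ps k x L hx]
    · rw [if_neg (by simp [hkK, hlt])]
      apply PySem.Dict.ext
      show (pvK ps).map (fun x => (x, pvV m ps x)) = (pvK ps).map (fun x => (x, pvV m (ps ++ [(k, L)]) x))
      apply List.map_congr_left
      intro x _
      by_cases hx : x = k
      · subst hx
        have h1 : pvV m (ps ++ [(x, L)]) x = pvV m ps x := by
          rw [pvV_snoc_self]; omega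
        rw [h1]
      · rw [pvV_snoc_ne m ps k x L hx]
  · have hkK : k ∉ pvK ps := fun h => hmem ((pvMem_K ps k).mp h)
    rw [if_neg hkK, pvK_snoc, if_neg hmem, if_pos (by simp [hkK])]
    apply PySem.Dict.ext
    have hc : (PySem.Dict.mk ((pvK ps).map (fun x => (x, pvV m ps x)))).contains k = false := by
      rw [pvContains_map]; simpa using hkK
    show (PySem.Dict.insert _ k (if L ≥ m then L else m)).items = _
    rw [PySem.Dict.items_insert, hc, if_neg (by simp)]
    show (pvK ps).map (fun x => (x, pvV m ps x)) ++ [(k, if L ≥ m then L else m)]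
        = (pvK ps ++ [k]).map (fun x => (x, pvV m (ps ++ [(k, L)]) x))
    rw [List.map_append]
    congr 1
    · apply List.map_congr_left
      intro x hx
      have hxk : x ≠ k := fun e => hkK (e ▸ hx)
      rw [pvV_snoc_ne m ps k x L hxk]
    · have h1 : pvV m (ps ++ [(k, L)]) k = max m L := by
        rw [pvV_snoc_self, pvV_not_mem m ps k hmem]
      have h2 : (if L ≥ m then L else m) = max m L := by omega
      simp [h1, h2]

lemma pvFold_model (m : Int) (ps : List (String × Int)) :
    ps.foldl (pvStep m) (PySem.Dict.mk []) = PySem.Dict.mk (pvModel m ps) := by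
  induction ps using List.reverseRecOn with
  | nil => rfl
  | append_singleton t p ih =>
    rw [List.foldl_append, List.foldl_cons, List.foldl_nil, ih]
    exact pvModel_snoc m t p.1 p.2

-- ===== VERDICT =====
theorem dict_values_len_spec : Claim_equal_dict_values_len := by
  intro dictionary m _
  show dict_values_len dictionary m = dict_values_len_alt dictionary m
  unfold dict_values_len dict_values_len_alt
  have hfun : (fun (d : PySem.Dict String Int) (kv : String × List (String × String)) =>
      kv.2.foldl (fun d p =>
        let L : Int := PySem.Str.len p.2
        if !(d.contains p.1) || decide (d.getD p.1 0 < L) then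
          d.insert p.1 (if L ≥ m then L else m)
        else d) d)
      = (fun d kv => (kv.2.map (fun p => (p.1, PySem.Str.len p.2))).foldl (pvStep m) d) := by
    funext d kv
    rw [List.foldl_map]
    rfl
  rw [hfun, ← List.foldl_flatMap, pvFold_model]
  rfl
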